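-- pv_equiv track=rewrite | github.com/proteetpaul/Attribute-Based-Access-Control | CND Tree/ndds_functions.py | CalcIntersectionSum
-- ===== SOURCE A (Python) =====
-- def UnionStrings(string1, string2): # checked
--     """ Calculates union of 2 serialised sets """
--     arr = []
--     n = len(string1)
--     for i in range(0,n):
--         if string1[i]=='1' or string2[i] == '1':
--             arr.append('1')
--         else:
--             arr.append('0')
--     string3 = ""
--     for i in arr:
--         string3 = string3 + i
--     return string3
--
-- def IntersectionStrings(string1, string2):      # checked
--     """ Calculates intersection of 2 serialised sets """
--     n = len(string1)
--     res = 0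
--     for i in range(0,n):
--         if string1[i]=='1' and string2[i]=='1':
--             res+=1
--     return res
--
-- def CalcIntersectionSum(ml):        # checked
--     """ Calculate sum of intersections obtained by placing a crossing set at a particular position """
--     prefix_sets = [ml[0]]
--     suffix_sets = [ml[-1]]
--     n = len(ml)
--     for i in range(1,n):
--         prefix_sets.append(UnionStrings(prefix_sets[i-1], ml[i]))
--     j = 0
--     for i in range(n-2,-1,-1):
--         suffix_sets.append(UnionStrings(suffix_sets[j], ml[i]))
--         j += 1
--     res=0
--     for i in range(0,n-1):
--         res+=IntersectionStrings(prefix_sets[i], suffix_sets[n-2-i])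
--     return res
-- ===== SOURCE B (Python) =====
-- def CalcIntersectionSum(ml):
--     """Per-column scan: each bit column contributes (last row with '1') - (first row with '1')."""
--     L = len(ml[0])
--     n = len(ml)
--     res = 0
--     for p in range(L):
--         first = -1
--         last = -1
--         for i in range(n):
--             if ml[i][p] == '1':
--                 if first < 0:
--                     first = i
--                 last = i
--         if first >= 0:
--             res += last - first
--     return res
-- ===== Notes on version B (the rewrite author's own statement) =====
-- stated objective: faster
-- what changed: Replaces the construction of prefix-union and suffix-union strings and the sum of their pairwise intersections by a single per-column scan that adds, for every bit position, (index of last row with a set bit) - (index of first row with a set bit).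
-- outside the precondition, e.g. on CalcIntersectionSum(['1', '1', ' \t', '', '', '', ' 1y:0', ' c ', '1']): A returns 8, B raises IndexError; on CalcIntersectionSum(['1', '11', '1']): A returns 2, B returns 2
import Mathlib
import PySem

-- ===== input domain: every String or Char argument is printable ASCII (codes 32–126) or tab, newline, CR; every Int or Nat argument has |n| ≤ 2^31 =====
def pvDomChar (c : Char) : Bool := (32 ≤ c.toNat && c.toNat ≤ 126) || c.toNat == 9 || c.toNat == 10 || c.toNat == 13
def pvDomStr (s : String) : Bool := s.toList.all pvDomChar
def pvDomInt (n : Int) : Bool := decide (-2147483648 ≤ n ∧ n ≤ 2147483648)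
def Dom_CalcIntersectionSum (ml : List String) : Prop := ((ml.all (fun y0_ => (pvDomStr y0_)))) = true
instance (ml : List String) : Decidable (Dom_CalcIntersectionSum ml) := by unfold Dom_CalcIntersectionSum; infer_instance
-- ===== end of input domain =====

-- B replaces the prefix/suffix union strings and summed intersections of A by a single
-- per-column scan adding (last set row - first set row) per bit column: asymptotically faster.


-- ===== PORT A =====
-- Strings are handled as their character lists (PySem.Chars style); in-range indexing is
-- ported with pyGetD (the default never fires on inputs admitted by Pre_).
def UnionStrings (string1 string2 : List Char) : List Char :=
  let n : Int := string1.length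
  let arr : List Char := (PySem.List.pyRange 0 n).foldl
    (fun arr i =>
      if PySem.List.pyGetD string1 i ' ' = '1' ∨ PySem.List.pyGetD string2 i ' ' = '1'
      then arr ++ ['1'] else arr ++ ['0']) []
  arr.foldl (fun string3 c => string3 ++ [c]) []

def IntersectionStrings (string1 string2 : List Char) : Int :=
  let n : Int := string1.length
  (PySem.List.pyRange 0 n).foldl
    (fun res i =>
      if PySem.List.pyGetD string1 i ' ' = '1' ∧ PySem.List.pyGetD string2 i ' ' = '1'
      then res + 1 else res) 0

def CalcIntersectionSum (ml : List String) : Int :=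
  let mlc : List (List Char) := ml.map String.toList
  let prefix_sets : List (List Char) := [PySem.List.pyGetD mlc 0 []]
  let suffix_sets : List (List Char) := [PySem.List.pyGetD mlc (-1) []]
  let n : Int := mlc.length
  let prefix_sets := (PySem.List.pyRange 1 n).foldl
    (fun ps i => ps ++ [UnionStrings (PySem.List.pyGetD ps (i - 1) []) (PySem.List.pyGetD mlc i [])])
    prefix_sets
  let sj := (PySem.List.pyRange (n - 2) (-1) (-1)).foldl
    (fun sj i =>
      (sj.1 ++ [UnionStrings (PySem.List.pyGetD sj.1 sj.2 []) (PySem.List.pyGetD mlc i [])], sj.2 + 1))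
    (suffix_sets, (0 : Int))
  let suffix_sets := sj.1
  (PySem.List.pyRange 0 (n - 1)).foldl
    (fun res i =>
      res + IntersectionStrings (PySem.List.pyGetD prefix_sets i [])
        (PySem.List.pyGetD suffix_sets (n - 2 - i) [])) 0

-- ===== PORT B =====
def CalcIntersectionSum_alt (ml : List String) : Int :=
  let mlc : List (List Char) := ml.map String.toList
  let L : Int := (PySem.List.pyGetD mlc 0 []).length
  let n : Int := mlc.length
  (PySem.List.pyRange 0 L).foldl
    (fun res p =>
      let fl := (PySem.List.pyRange 0 n).foldl
        (fun fl i =>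
          if PySem.List.pyGetD (PySem.List.pyGetD mlc i []) p ' ' = '1'
          then (if fl.1 < 0 then i else fl.1, i) else fl)
        ((-1 : Int), (-1 : Int))
      if 0 ≤ fl.1 then res + (fl.2 - fl.1) else res) 0

-- ===== PRECONDITION & SPEC =====
-- Pre_ excludes the empty list (A raises IndexError on ml[0]) and lists whose strings differ in
-- length: on most of those A raises IndexError while indexing a shorter string, and where A still
-- returns (its short-circuiting `or`/`and` happens to skip indexing the shorter strings) B either
-- raises IndexError itself or returns the same value — see the cited examples.
def Pre_CalcIntersectionSum (ml : List String) : Prop :=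
  ml ≠ [] ∧ ∀ s ∈ ml, s.toList.length = (ml.headI).toList.length
instance (ml : List String) : Decidable (Pre_CalcIntersectionSum ml) := by
  unfold Pre_CalcIntersectionSum; infer_instance

def pvWitness_CalcIntersectionSum : List String := ["0110", "1010", "0011"]

def Spec_CalcIntersectionSum (ml : List String) (out : Int) : Prop := out = CalcIntersectionSum_alt ml
instance (ml : List String) (out : Int) : Decidable (Spec_CalcIntersectionSum ml out) := by
  unfold Spec_CalcIntersectionSum; infer_instance

-- ===== CLAIM (what is proved, stated in full; the proofs are below) =====
def Claim_equal_CalcIntersectionSum : Prop := ∀ (ml : List String), Dom_CalcIntersectionSum ml → Pre_CalcIntersectionSum ml → Spec_CalcIntersectionSum ml (CalcIntersectionSum ml)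

-- ===== LEMMAS AND PROOFS =====

-- abstract bit: does row r of `rows` carry '1' at column p?
def pvBit (rows : List (List Char)) (p r : Nat) : Bool :=
  decide ((rows.getD r []).getD p ' ' = '1')

-- first/last set row of a column, as B's inner loop computes them
def pvScan (b : Nat → Bool) : Nat → Int × Int
  | 0 => (-1, -1)
  | m+1 =>
    let fl := pvScan b m
    if b m then (if fl.1 < 0 then (m : Int) else fl.1, (m : Int)) else fl

lemma pyRange_nat (a b : Nat) :
    PySem.List.pyRange (a : Int) (b : Int) = (List.range (b - a)).map (fun k => ((a + k : Nat) : Int)) := by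
  rw [PySem.List.pyRange_of_pos _ _ (by norm_num : (0:Int) < 1)]
  by_cases h : a < b
  · rw [if_pos (by exact_mod_cast h)]
    have h1 : (((b:Int) - a + 1 - 1) / 1).toNat = b - a := by omega
    rw [h1]
    exact List.map_congr_left (fun k _ => by push_cast; ring)
  · rw [if_neg (by exact_mod_cast h)]
    have : b - a = 0 := by omega
    simp [this]

lemma pyRange_down (m : Nat) :
    PySem.List.pyRange ((m : Int) - 1) (-1) (-1)
      = (List.range m).map (fun (k : Nat) => (m : Int) - 1 - (k : Int)) := by
  induction m with
  | zero =>
    norm_num [PySem.List.pyRange]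
  | succ m ih =>
    rw [PySem.List.pyRange_neg_one_cons (by push_cast; omega)]
    rw [show ((m + 1 : Nat) : Int) - 1 = (m : Int) by push_cast; ring]
    rw [ih, List.range_succ_eq_map, List.map_cons, List.map_map]
    refine congrArg₂ List.cons (by push_cast; ring) ?_
    refine List.map_congr_left (fun k _ => ?_)
    show (m : Int) - 1 - (k : Int) = (m : Int) - ((k + 1 : Nat) : Int)
    omega

lemma pyGetD_neg_one {α : Type} (xs : List α) (d : α) (h : xs ≠ []) :
    PySem.List.pyGetD xs (-1) d = xs.getD (xs.length - 1) d := by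
  have hl : 1 ≤ xs.length := by cases xs <;> simp_all
  simp only [PySem.List.pyGetD, PySem.List.pyGet?, PySem.List.pyIdx?]
  norm_num [hl, List.getD_eq_getElem?_getD]

lemma pyGetD_zero {α : Type} (xs : List α) (d : α) :
    PySem.List.pyGetD xs (0 : Int) d = xs.getD 0 d := by
  rw [show ((0:Int)) = ((0:Nat):Int) by simp, PySem.List.pyGetD_natCast]

lemma getD_snoc_self {α : Type} (l : List α) (x : α) (d : α) :
    (l ++ [x]).getD l.length d = x := by
  rw [List.getD_eq_getElem?_getD, List.getElem?_append_right (le_refl _)]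
  simp

lemma pvBit_iff (rows : List (List Char)) (p r : Nat) :
    pvBit rows p r = true ↔ (rows.getD r []).getD p ' ' = '1' := by
  simp [pvBit]

lemma union_eq (a b : List Char) :
    UnionStrings a b = (List.range a.length).map
      (fun p => if a.getD p ' ' = '1' ∨ b.getD p ' ' = '1' then '1' else '0') := by
  unfold UnionStrings
  dsimp only
  rw [PySem.List.pyRange_zero_natCast, List.foldl_map]
  have h1 : (fun (arr : List Char) (k : Nat) =>
      if PySem.List.pyGetD a (↑k) ' ' = '1' ∨ PySem.List.pyGetD b (↑k) ' ' = '1'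
      then arr ++ ['1'] else arr ++ ['0'])
      = fun arr k => arr ++ [if a.getD k ' ' = '1' ∨ b.getD k ' ' = '1' then '1' else '0'] := by
    funext arr k
    rw [PySem.List.pyGetD_natCast, PySem.List.pyGetD_natCast]
    by_cases h : a.getD k ' ' = '1' ∨ b.getD k ' ' = '1'
    · rw [if_pos h, if_pos h]
    · rw [if_neg h, if_neg h]
  rw [h1, PySem.List.foldl_append_singleton_eq_map, PySem.List.foldl_append_singleton_eq_map]
  simp

lemma union_length (a b : List Char) : (UnionStrings a b).length = a.length := by
  rw [union_eq]; simp

lemma union_getD (a b : List Char) (p : Nat) (hp : p < a.length) :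
    (UnionStrings a b).getD p ' ' = if a.getD p ' ' = '1' ∨ b.getD p ' ' = '1' then '1' else '0' := by
  rw [union_eq, List.getD_eq_getElem?_getD]
  simp [hp]

lemma union_getD_iff (a b : List Char) (p : Nat) (hp : p < a.length) :
    ((UnionStrings a b).getD p ' ' = '1') ↔ (a.getD p ' ' = '1' ∨ b.getD p ' ' = '1') := by
  rw [union_getD a b p hp]
  by_cases h : a.getD p ' ' = '1' ∨ b.getD p ' ' = '1'
  · rw [if_pos h]
    exact ⟨fun _ => h, fun _ => rfl⟩
  · rw [if_neg h]
    exact ⟨fun hc => absurd hc (by decide), fun hd => absurd hd h⟩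

lemma inter_eq (a b : List Char) :
    IntersectionStrings a b =
      ((List.range a.length).countP (fun p => decide (a.getD p ' ' = '1' ∧ b.getD p ' ' = '1')) : Int) := by
  unfold IntersectionStrings
  dsimp only
  rw [PySem.List.pyRange_zero_natCast, List.foldl_map]
  have h1 : (fun (res : Int) (k : Nat) =>
      if PySem.List.pyGetD a (↑k) ' ' = '1' ∧ PySem.List.pyGetD b (↑k) ' ' = '1' then res + 1 else res)
      = fun res k => if (fun p => decide (a.getD p ' ' = '1' ∧ b.getD p ' ' = '1')) k = true
          then res + 1 else res := by
    funext res k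
    rw [PySem.List.pyGetD_natCast, PySem.List.pyGetD_natCast]
    simp
  rw [h1, PySem.List.foldl_count_if]
  simp

-- generic loop invariant for a fold over `List.range m`
lemma foldl_inv {S : Type} (f : S → Nat → S) (Inv : S → Nat → Prop) (init : S) (m : Nat)
    (h0 : Inv init 0) (hstep : ∀ s k, k < m → Inv s k → Inv (f s k) (k + 1)) :
    Inv ((List.range m).foldl f init) m := by
  suffices h : ∀ j, j ≤ m → Inv ((List.range j).foldl f init) j from h m (le_refl m)
  intro j hj
  induction j with
  | zero => simpa using h0
  | succ j ih =>
    rw [List.range_succ, List.foldl_append, List.foldl_cons, List.foldl_nil]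
    exact hstep _ j (by omega) (ih (by omega))

lemma pvScan_none (b : Nat → Bool) (m : Nat) (h : ∀ r, r < m → ¬ b r = true) :
    pvScan b m = (-1, -1) := by
  induction m with
  | zero => rfl
  | succ m ih =>
    simp only [pvScan]
    rw [ih (fun r hr => h r (by omega))]
    simp [h m (by omega)]

lemma pvScan_some (b : Nat → Bool) (m : Nat) (h : ∃ r, r < m ∧ b r = true) :
    ∃ F Lst : Nat, pvScan b m = ((F : Int), (Lst : Int)) ∧ F ≤ Lst ∧ Lst < m ∧
      b F = true ∧ b Lst = true ∧ (∀ r, r < F → ¬ b r = true) ∧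
      (∀ r, Lst < r → r < m → ¬ b r = true) := by
  induction m with
  | zero => obtain ⟨r, hr, _⟩ := h; omega
  | succ m ih =>
    by_cases hbm : b m = true
    · by_cases hex : ∃ r, r < m ∧ b r = true
      · obtain ⟨F, Lst, hscan, hFL, hLm, hbF, hbL, hmin, hmax⟩ := ih hex
        refine ⟨F, m, ?_, by omega, by omega, hbF, hbm, hmin, fun r h1 h2 => by omega⟩
        simp only [pvScan, hscan, hbm, if_true]
        have : ¬ ((F : Int) < 0) := by omega
        simp [this]
      · push_neg at hex
        refine ⟨m, m, ?_, le_refl _, by omega, hbm, hbm,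
          fun r hr => by simpa using hex r hr, fun r h1 h2 => by omega⟩
        rw [show pvScan b (m+1) = if b m then (if (pvScan b m).1 < 0 then (m : Int) else (pvScan b m).1, (m : Int)) else pvScan b m from rfl]
        rw [pvScan_none b m (fun r hr => by simpa using hex r hr)]
        simp [hbm]
    · obtain ⟨F, Lst, hscan, hFL, hLm, hbF, hbL, hmin, hmax⟩ := ih (by
        obtain ⟨r, hr, hb⟩ := h
        exact ⟨r, by rcases Nat.lt_succ_iff_lt_or_eq.mp hr with h' | h' ; exact h' ; (subst h'; exact absurd hb hbm), hb⟩)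
      refine ⟨F, Lst, ?_, hFL, by omega, hbF, hbL, hmin, fun r h1 h2 => ?_⟩
      · simp only [pvScan, hscan, hbm]
        simp
      · rcases Nat.lt_succ_iff_lt_or_eq.mp h2 with h' | h'
        · exact hmax r h1 h'
        · subst h'; exact hbm

lemma countP_int_sum (q : Nat → Bool) (L : Nat) :
    (((List.range L).countP q : Nat) : Int) = ∑ p ∈ Finset.range L, (if q p = true then (1:Int) else 0) := by
  induction L with
  | zero =>
    rw [List.range_zero, Finset.range_zero, List.countP_nil, Finset.sum_empty]
    rfl
  | succ L ih =>
    rw [List.range_succ, List.countP_append, Finset.sum_range_succ, ← ih]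
    by_cases h : q L = true
    · simp [h]
    · simp [h]

lemma sum_map_range_eq (f : Nat → Int) (m : Nat) :
    ((List.range m).map f).sum = ∑ i ∈ Finset.range m, f i := by
  induction m with
  | zero =>
    rw [List.range_zero, Finset.range_zero, List.map_nil, List.sum_nil, Finset.sum_empty]
  | succ m ih => rw [List.range_succ, Finset.sum_range_succ, List.map_append, List.sum_append, ih]; simp

lemma col (n : Nat) (b : Nat → Bool) :
    (∑ i ∈ Finset.range (n-1),
      (if (∃ r, r < i + 1 ∧ b r = true) ∧ (∃ r, r < n ∧ (i < r ∧ b r = true)) then (1:Int) else 0))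
    = (if 0 ≤ (pvScan b n).1 then (pvScan b n).2 - (pvScan b n).1 else 0) := by
  by_cases he : ∃ r, r < n ∧ b r = true
  · obtain ⟨F, Lst, hscan, hFL, hLn, hbF, hbL, hmin, hmax⟩ := pvScan_some b n he
    rw [hscan]
    have hcond : ∀ i : Nat,
        ((∃ r, r < i + 1 ∧ b r = true) ∧ (∃ r, r < n ∧ (i < r ∧ b r = true))) ↔ (F ≤ i ∧ i < Lst) := by
      intro i
      constructor
      · rintro ⟨⟨r1, hr1, hb1⟩, ⟨r2, hr2n, hi2, hb2⟩⟩
        constructor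
        · by_contra hcon
          exact hmin r1 (by omega) hb1
        · have : r2 ≤ Lst := by
            by_contra hcon
            exact hmax r2 (by omega) hr2n hb2
          omega
      · rintro ⟨h1, h2⟩
        exact ⟨⟨F, by omega, hbF⟩, ⟨Lst, hLn, h2, hbL⟩⟩
    have h1 : (∑ i ∈ Finset.range (n-1),
        (if (∃ r, r < i + 1 ∧ b r = true) ∧ (∃ r, r < n ∧ (i < r ∧ b r = true)) then (1:Int) else 0))
        = ∑ i ∈ Finset.range (n-1), (if (F ≤ i ∧ i < Lst) then (1:Int) else 0) := by
      refine Finset.sum_congr rfl (fun i _ => ?_)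
      exact if_congr (hcond i) rfl rfl
    rw [h1, ← Finset.sum_filter]
    have h2 : Finset.filter (fun i => F ≤ i ∧ i < Lst) (Finset.range (n-1)) = Finset.Ico F Lst := by
      ext i
      simp only [Finset.mem_filter, Finset.mem_range, Finset.mem_Ico]
      omega
    rw [h2]
    simp only [Finset.sum_const, Nat.card_Ico, nsmul_eq_mul, mul_one]
    rw [if_pos (by positivity : (0:Int) ≤ (F:Int))]
    omega
  · push_neg at he
    rw [pvScan_none b n (fun r hr => by simpa using he r hr)]
    rw [if_neg (by norm_num : ¬ ((0:Int) ≤ (((-1 : Int), (-1 : Int)) : Int × Int).1))]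
    refine (Finset.sum_eq_zero (fun i _ => ?_))
    rw [if_neg]
    rintro ⟨_, ⟨r, hrn, _, hb⟩⟩
    exact absurd hb (by simpa using he r hrn)

lemma key (n L : Nat) (bit : Nat → Nat → Bool) :
    ((List.range (n-1)).map (fun i =>
      (((List.range L).countP (fun p =>
        decide ((∃ r, r < i + 1 ∧ bit p r = true) ∧ (∃ r, r < n ∧ (i < r ∧ bit p r = true))))) : Int))).sum
    = ((List.range L).map (fun p =>
        if 0 ≤ (pvScan (fun r => bit p r) n).1
        then (pvScan (fun r => bit p r) n).2 - (pvScan (fun r => bit p r) n).1 else 0)).sum := by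
  rw [sum_map_range_eq, sum_map_range_eq]
  have h1 : ∀ i : Nat, (((List.range L).countP (fun p =>
      decide ((∃ r, r < i + 1 ∧ bit p r = true) ∧ (∃ r, r < n ∧ (i < r ∧ bit p r = true))))) : Int)
      = ∑ p ∈ Finset.range L,
        (if (∃ r, r < i + 1 ∧ bit p r = true) ∧ (∃ r, r < n ∧ (i < r ∧ bit p r = true)) then (1:Int) else 0) := by
    intro i
    rw [countP_int_sum]
    refine Finset.sum_congr rfl (fun p _ => ?_)
    simp
  calc ∑ i ∈ Finset.range (n-1), (((List.range L).countP (fun p =>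
        decide ((∃ r, r < i + 1 ∧ bit p r = true) ∧ (∃ r, r < n ∧ (i < r ∧ bit p r = true))))) : Int)
      = ∑ i ∈ Finset.range (n-1), ∑ p ∈ Finset.range L,
          (if (∃ r, r < i + 1 ∧ bit p r = true) ∧ (∃ r, r < n ∧ (i < r ∧ bit p r = true)) then (1:Int) else 0) :=
        Finset.sum_congr rfl (fun i _ => h1 i)
    _ = ∑ p ∈ Finset.range L, ∑ i ∈ Finset.range (n-1),
          (if (∃ r, r < i + 1 ∧ bit p r = true) ∧ (∃ r, r < n ∧ (i < r ∧ bit p r = true)) then (1:Int) else 0) :=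
        Finset.sum_comm
    _ = ∑ p ∈ Finset.range L, (if 0 ≤ (pvScan (fun r => bit p r) n).1
          then (pvScan (fun r => bit p r) n).2 - (pvScan (fun r => bit p r) n).1 else 0) :=
        Finset.sum_congr rfl (fun p _ => col n (fun r => bit p r))

lemma scan_fold (rows : List (List Char)) (p : Nat) (m : Nat) :
    (List.range m).foldl (fun (fl : Int × Int) (k : Nat) =>
      if PySem.List.pyGetD (PySem.List.pyGetD rows (↑k) []) (↑p) ' ' = '1'
      then (if fl.1 < 0 then (↑k : Int) else fl.1, (↑k : Int)) else fl) ((-1 : Int), (-1 : Int))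
    = pvScan (fun r => pvBit rows p r) m := by
  induction m with
  | zero => rfl
  | succ m ih =>
    rw [List.range_succ, List.foldl_append, List.foldl_cons, List.foldl_nil, ih]
    simp only [pvScan, PySem.List.pyGetD_natCast, pvBit, decide_eq_true_eq]

lemma pyRange_one_nat (b : Nat) :
    PySem.List.pyRange 1 (b : Int) = (List.range (b - 1)).map (fun k => ((1 + k : Nat) : Int)) := by
  have h := pyRange_nat 1 b
  rw [Nat.cast_one] at h
  exact h

lemma coreA (rows : List (List Char)) (hne : rows ≠ [])
    (hlen : ∀ t, t < rows.length → (rows.getD t []).length = (rows.getD 0 []).length) :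
    ((PySem.List.pyRange 0 ((rows.length : Int) - 1)).foldl
      (fun res i => res + IntersectionStrings
        (PySem.List.pyGetD
          ((PySem.List.pyRange 1 (rows.length : Int)).foldl
            (fun ps i => ps ++ [UnionStrings (PySem.List.pyGetD ps (i - 1) []) (PySem.List.pyGetD rows i [])])
            [PySem.List.pyGetD rows 0 []]) i [])
        (PySem.List.pyGetD
          ((PySem.List.pyRange ((rows.length : Int) - 2) (-1) (-1)).foldl
            (fun sj i => (sj.1 ++ [UnionStrings (PySem.List.pyGetD sj.1 sj.2 []) (PySem.List.pyGetD rows i [])], sj.2 + 1))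
            ([PySem.List.pyGetD rows (-1) []], (0 : Int))).1 ((rows.length : Int) - 2 - i) [])) 0)
    = ((List.range (rows.length - 1)).map (fun i =>
        (((List.range ((rows.getD 0 []).length)).countP (fun p =>
          decide ((∃ r, r < i + 1 ∧ pvBit rows p r = true) ∧
            (∃ r, r < rows.length ∧ (i < r ∧ pvBit rows p r = true))))) : Int))).sum := by
  have hN : 0 < rows.length := by
    cases rows with
    | nil => exact absurd rfl hne
    | cons a t => simp
  rw [pyGetD_zero, pyGetD_neg_one rows [] hne]
  rw [pyRange_one_nat rows.length]
  rw [show ((rows.length : Int) - 2) = (((rows.length - 1 : Nat)) : Int) - 1 by omega]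
  rw [pyRange_down (rows.length - 1)]
  rw [show ((rows.length : Int) - 1) = (((rows.length - 1 : Nat)) : Int) by omega]
  rw [PySem.List.pyRange_zero_natCast]
  simp only [List.foldl_map]
  have hPprop := foldl_inv
    (fun (ps : List (List Char)) (k : Nat) =>
      ps ++ [UnionStrings (PySem.List.pyGetD ps (((1 + k : Nat) : Int) - 1) []) (PySem.List.pyGetD rows ((1 + k : Nat) : Int) [])])
    (fun ps m => ps.length = m + 1 ∧ ∀ t, t ≤ m →
      ((ps.getD t []).length = (rows.getD 0 []).length ∧ ∀ p, p < (rows.getD 0 []).length →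
        (((ps.getD t []).getD p ' ' = '1') ↔ ∃ r, r ≤ t ∧ pvBit rows p r = true)))
    [rows.getD 0 []] (rows.length - 1)
    (by
      refine ⟨rfl, fun t ht => ?_⟩
      have ht0 : t = 0 := by omega
      subst ht0
      simp only [List.getD_cons_zero]
      refine ⟨by trivial, fun p hp => ?_⟩
      constructor
      · intro h
        exact ⟨0, le_refl 0, (pvBit_iff rows p 0).mpr h⟩
      · rintro ⟨r, hr, hb⟩
        have hr0 : r = 0 := by omega
        subst hr0
        exact (pvBit_iff rows p 0).mp hb)
    (by
      rintro ps k hk ⟨hlenps, hprops⟩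
      dsimp only
      have hcast : ((1 + k : Nat) : Int) - 1 = ((k : Nat) : Int) := by push_cast; ring
      rw [hcast, PySem.List.pyGetD_natCast, PySem.List.pyGetD_natCast]
      refine ⟨by simp [hlenps], fun t ht => ?_⟩
      by_cases htk : t ≤ k
      · have hlt : t < ps.length := by omega
        rw [List.getD_append _ _ _ _ hlt]
        exact hprops t htk
      · have ht1 : t = k + 1 := by omega
        subst ht1
        have hlast : (ps ++ [UnionStrings (ps.getD k []) (rows.getD (1 + k) [])]).getD (k + 1) []
            = UnionStrings (ps.getD k []) (rows.getD (1 + k) []) := by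
          rw [← hlenps]
          exact getD_snoc_self ps _ []
        rw [hlast]
        have hpk := hprops k (le_refl k)
        refine ⟨by rw [union_length, hpk.1], fun p hp => ?_⟩
        rw [union_getD_iff _ _ p (by rw [hpk.1]; exact hp)]
        constructor
        · rintro (h1 | h2)
          · obtain ⟨r, hr, hb⟩ := (hpk.2 p hp).mp h1
            exact ⟨r, by omega, hb⟩
          · exact ⟨1 + k, by omega, (pvBit_iff rows p (1 + k)).mpr h2⟩
        · rintro ⟨r, hr, hb⟩
          by_cases hrk : r ≤ k
          · exact Or.inl ((hpk.2 p hp).mpr ⟨r, hrk, hb⟩)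
          · have hr1 : r = 1 + k := by omega
            subst hr1
            exact Or.inr ((pvBit_iff rows p (1 + k)).mp hb))
  have hSprop := foldl_inv
    (fun (sj : List (List Char) × Int) (k : Nat) =>
      (sj.1 ++ [UnionStrings (PySem.List.pyGetD sj.1 sj.2 [])
        (PySem.List.pyGetD rows (((rows.length - 1 : Nat) : Int) - 1 - (k : Int)) [])], sj.2 + 1))
    (fun sj m => sj.2 = (m : Int) ∧ sj.1.length = m + 1 ∧ ∀ t, t ≤ m →
      ((sj.1.getD t []).length = (rows.getD 0 []).length ∧ ∀ p, p < (rows.getD 0 []).length →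
        ((sj.1.getD t []).getD p ' ' = '1' ↔
          ∃ r, rows.length - 1 - t ≤ r ∧ r < rows.length ∧ pvBit rows p r = true)))
    ([rows.getD (rows.length - 1) []], (0 : Int)) (rows.length - 1)
    (by
      refine ⟨rfl, rfl, fun t ht => ?_⟩
      have ht0 : t = 0 := by omega
      subst ht0
      simp only [List.getD_cons_zero]
      refine ⟨hlen (rows.length - 1) (by omega), fun p hp => ?_⟩
      constructor
      · intro h
        exact ⟨rows.length - 1, by omega, by omega, (pvBit_iff rows p (rows.length - 1)).mpr h⟩
      · rintro ⟨r, hr1, hr2, hb⟩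
        have hr0 : r = rows.length - 1 := by omega
        subst hr0
        exact (pvBit_iff rows p (rows.length - 1)).mp hb)
    (by
      rintro sj k hk ⟨hj, hlensj, hprops⟩
      dsimp only
      have hcast : ((rows.length - 1 : Nat) : Int) - 1 - (k : Int) = ((rows.length - 2 - k : Nat) : Int) := by omega
      rw [hcast, hj, PySem.List.pyGetD_natCast, PySem.List.pyGetD_natCast]
      refine ⟨by push_cast; ring, by simp [hlensj], fun t ht => ?_⟩
      by_cases htk : t ≤ k
      · have hlt : t < sj.1.length := by omega
        rw [List.getD_append _ _ _ _ hlt]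
        exact hprops t htk
      · have ht1 : t = k + 1 := by omega
        subst ht1
        have hlast : (sj.1 ++ [UnionStrings (sj.1.getD k []) (rows.getD (rows.length - 2 - k) [])]).getD (k + 1) []
            = UnionStrings (sj.1.getD k []) (rows.getD (rows.length - 2 - k) []) := by
          rw [← hlensj]
          exact getD_snoc_self sj.1 _ []
        rw [hlast]
        have hpk := hprops k (le_refl k)
        refine ⟨by rw [union_length, hpk.1], fun p hp => ?_⟩
        rw [union_getD_iff _ _ p (by rw [hpk.1]; exact hp)]
        constructor
        · rintro (h1 | h2)
          · obtain ⟨r, hr1, hr2, hb⟩ := (hpk.2 p hp).mp h1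
            exact ⟨r, by omega, hr2, hb⟩
          · exact ⟨rows.length - 2 - k, by omega, by omega,
              (pvBit_iff rows p (rows.length - 2 - k)).mpr h2⟩
        · rintro ⟨r, hr1, hr2, hb⟩
          by_cases hrk : rows.length - 1 - k ≤ r
          · exact Or.inl ((hpk.2 p hp).mpr ⟨r, hrk, hr2, hb⟩)
          · have hr1' : r = rows.length - 2 - k := by omega
            subst hr1'
            exact Or.inr ((pvBit_iff rows p (rows.length - 2 - k)).mp hb))
  rw [PySem.List.foldl_add, zero_add]
  refine congrArg List.sum (List.map_congr_left ?_)
  intro i hi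
  rw [List.mem_range] at hi
  have hN2 : 2 ≤ rows.length := by omega
  obtain ⟨hPlen, hPprops⟩ := hPprop
  obtain ⟨hSj, hSlen, hSprops⟩ := hSprop
  rw [PySem.List.pyGetD_natCast]
  rw [show ((rows.length - 1 : Nat) : Int) - 1 - (i : Int) = ((rows.length - 2 - i : Nat) : Int) by omega]
  rw [PySem.List.pyGetD_natCast]
  rw [inter_eq]
  have hPi := hPprops i (by omega)
  have hSi := hSprops (rows.length - 2 - i) (by omega)
  rw [hPi.1]
  refine congrArg (fun m : Nat => (m : Int)) (List.countP_congr ?_)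
  intro p hp
  rw [List.mem_range] at hp
  simp only [decide_eq_true_eq]
  refine and_congr ((hPi.2 p hp).trans ⟨?_, ?_⟩) ((hSi.2 p hp).trans ⟨?_, ?_⟩)
  · rintro ⟨r, h1, h2⟩
    exact ⟨r, by omega, h2⟩
  · rintro ⟨r, h1, h2⟩
    exact ⟨r, by omega, h2⟩
  · rintro ⟨r, h1, h2, h3⟩
    exact ⟨r, h2, by omega, h3⟩
  · rintro ⟨r, h1, h2, h3⟩
    exact ⟨r, by omega, h1, h3⟩

lemma coreB (rows : List (List Char)) :
    ((PySem.List.pyRange 0 (((PySem.List.pyGetD rows 0 []).length : Int))).foldl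
      (fun res p =>
        let fl := (PySem.List.pyRange 0 ((rows.length : Int))).foldl
          (fun fl i =>
            if PySem.List.pyGetD (PySem.List.pyGetD rows i []) p ' ' = '1'
            then (if fl.1 < 0 then i else fl.1, i) else fl) ((-1 : Int), (-1 : Int))
        if 0 ≤ fl.1 then res + (fl.2 - fl.1) else res) 0)
    = ((List.range ((rows.getD 0 []).length)).map (fun p =>
        if 0 ≤ (pvScan (fun r => pvBit rows p r) rows.length).1
        then (pvScan (fun r => pvBit rows p r) rows.length).2 - (pvScan (fun r => pvBit rows p r) rows.length).1
        else 0)).sum := by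
  rw [pyGetD_zero]
  rw [PySem.List.pyRange_zero_natCast ((rows.getD 0 []).length), List.foldl_map]
  have hbody : (fun (res : Int) (p : Nat) =>
      let fl := (PySem.List.pyRange 0 ((rows.length : Int))).foldl
        (fun fl i =>
          if PySem.List.pyGetD (PySem.List.pyGetD rows i []) ((p : Nat) : Int) ' ' = '1'
          then (if fl.1 < 0 then i else fl.1, i) else fl) ((-1 : Int), (-1 : Int))
      if 0 ≤ fl.1 then res + (fl.2 - fl.1) else res)
      = fun res p => res + (if 0 ≤ (pvScan (fun r => pvBit rows p r) rows.length).1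
          then (pvScan (fun r => pvBit rows p r) rows.length).2 - (pvScan (fun r => pvBit rows p r) rows.length).1
          else 0) := by
    funext res p
    dsimp only
    rw [PySem.List.pyRange_zero_natCast, List.foldl_map, scan_fold rows p rows.length]
    by_cases h : 0 ≤ (pvScan (fun r => pvBit rows p r) rows.length).1
    · rw [if_pos h, if_pos h]
    · rw [if_neg h, if_neg h]
      exact (add_zero res).symm
  rw [hbody, PySem.List.foldl_add, zero_add]

-- ===== VERDICT (by name: the statement is the Claim_ definition above) =====
theorem CalcIntersectionSum_spec : Claim_equal_CalcIntersectionSum := by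
  intro ml _ hpre
  unfold Spec_CalcIntersectionSum
  obtain ⟨hne, hlen⟩ := hpre
  have hrne : ml.map String.toList ≠ [] := by
    intro h
    exact hne (List.map_eq_nil_iff.mp h)
  have hlen' : ∀ t, t < (ml.map String.toList).length →
      ((ml.map String.toList).getD t []).length = ((ml.map String.toList).getD 0 []).length := by
    intro t ht
    rw [List.length_map] at ht
    have h0 : 0 < ml.length := by omega
    have h1 : (ml.map String.toList).getD t [] = (ml[t]'ht).toList := by
      rw [List.getD_eq_getElem?_getD, List.getElem?_map]
      simp [List.getElem?_eq_getElem ht]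
    have h2 : (ml.map String.toList).getD 0 [] = (ml[0]'h0).toList := by
      rw [List.getD_eq_getElem?_getD, List.getElem?_map]
      simp [List.getElem?_eq_getElem h0]
    rw [h1, h2, hlen (ml[t]'ht) (List.getElem_mem ht), hlen (ml[0]'h0) (List.getElem_mem h0)]
  show CalcIntersectionSum ml = CalcIntersectionSum_alt ml
  unfold CalcIntersectionSum CalcIntersectionSum_alt
  exact (coreA (ml.map String.toList) hrne hlen').trans
    ((key (ml.map String.toList).length ((ml.map String.toList).getD 0 []).length
        (pvBit (ml.map String.toList))).trans
      (coreB (ml.map String.toList)).symm)
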